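-- pv_equiv track=rewrite | github.com/Salman-Faris3090/Lab-Cycle-1 | Cycle-1/q1.py | diff_pro
-- ===== SOURCE A (Python) =====
-- def diff_pro(n):
--   p=1
--   o=1
--   e=1
--   while n>0:
--     r=n%10
--     if p%2==0:
--       e=e*r
--     else:
--       o=o*r
--     p=p+1
--     n=n//10
--   c=(o-e)*-1
--   return c
-- ===== SOURCE B (Python) =====
-- def diff_pro(n):
--     # Collect digits least-significant first, then take strided products.
--     digits = []
--     while n > 0:
--         digits.append(n % 10)
--         n //= 10
--     e = 1
--     for d in digits[1::2]:
--         e *= d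
--     o = 1
--     for d in digits[0::2]:
--         o *= d
--     return e - o
-- ===== Notes on version B (the rewrite author's own statement) =====
-- stated objective: alternative
-- what changed: Replaced the single interleaved loop with a parity counter and per-digit branch by a digit-collection pass followed by two stride-2 slice products (even-position product minus odd-position product).
import Mathlib
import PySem

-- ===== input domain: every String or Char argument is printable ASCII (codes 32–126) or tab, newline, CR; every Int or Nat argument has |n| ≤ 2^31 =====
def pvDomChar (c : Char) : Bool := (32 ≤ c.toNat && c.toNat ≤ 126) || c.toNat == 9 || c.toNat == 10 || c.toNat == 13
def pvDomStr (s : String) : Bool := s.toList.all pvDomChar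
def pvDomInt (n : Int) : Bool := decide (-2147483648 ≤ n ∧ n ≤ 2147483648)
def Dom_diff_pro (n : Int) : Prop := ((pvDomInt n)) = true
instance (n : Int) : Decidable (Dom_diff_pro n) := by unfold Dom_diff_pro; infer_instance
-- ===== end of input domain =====

-- B replaces A's interleaved parity-counter loop by a digit-collection pass plus two
-- stride-2 products (alternative decomposition, same cost).


-- termination helper for the 'while n > 0: … n //= 10' loops of both ports
theorem pvFloordivTenLt (n : Int) (h : 0 < n) :
    (PySem.Int.floordiv n 10).toNat < n.toNat := by
  simp only [PySem.Int.floordiv]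
  rw [Int.fdiv_eq_ediv]
  simp only [show (0:Int) ≤ 10 by norm_num, true_or, if_pos]
  omega

-- ===== PORT A =====
-- the while loop, state (p, o, e, n); returns the final (o, e)
def diffProLoop (p o e n : Int) : Int × Int :=
  if h : 0 < n then
    let r := PySem.Int.mod n 10
    if PySem.Int.mod p 2 = 0 then
      diffProLoop (p + 1) o (e * r) (PySem.Int.floordiv n 10)
    else
      diffProLoop (p + 1) (o * r) e (PySem.Int.floordiv n 10)
  else (o, e)
termination_by n.toNat
decreasing_by all_goals exact pvFloordivTenLt n h

def diff_pro (n : Int) : Int :=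
  let oe := diffProLoop 1 1 1 n
  (oe.1 - oe.2) * (-1)

-- ===== PORT B =====
-- the 'while n > 0: digits.append(n % 10); n //= 10' loop (cons builds the same LSB-first list)
def altDigits (n : Int) : List Int :=
  if h : 0 < n then PySem.Int.mod n 10 :: altDigits (PySem.Int.floordiv n 10) else []
termination_by n.toNat
decreasing_by exact pvFloordivTenLt n h

-- digits[k::2] ported by hand: stride-2 slice from the front of a list (exact for a
-- nonnegative start and step 2, the only slices Source B takes: l[0::2] = stride2 l,
-- l[1::2] = stride2 (l.drop 1))
def stride2 (l : List Int) : List Int :=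
  match l with
  | [] => []
  | x :: xs => x :: stride2 (xs.drop 1)
termination_by l.length
decreasing_by simp

def diff_pro_alt (n : Int) : Int :=
  let digits := altDigits n
  let e := (stride2 (digits.drop 1)).foldl (· * ·) 1   -- for d in digits[1::2]: e *= d
  let o := (stride2 digits).foldl (· * ·) 1            -- for d in digits[0::2]: o *= d
  e - o

-- ===== PRECONDITION & SPEC =====
def Spec_diff_pro (n : Int) (out : Int) : Prop := out = diff_pro_alt n
instance (n : Int) (out : Int) : Decidable (Spec_diff_pro n out) := by unfold Spec_diff_pro; infer_instance

-- ===== CLAIM (what is proved, stated in full; the proofs are below) =====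
def Claim_equal_diff_pro : Prop := ∀ (n : Int), Dom_diff_pro n → Spec_diff_pro n (diff_pro n)

-- ===== LEMMAS AND PROOFS =====

@[simp] theorem stride2_nil : stride2 [] = [] := by rw [stride2]
@[simp] theorem stride2_cons (x : Int) (xs : List Int) :
    stride2 (x :: xs) = x :: stride2 (xs.drop 1) := by rw [stride2]

theorem foldl_mul_eq_prod (l : List Int) : l.foldl (· * ·) 1 = l.prod :=
  (List.prod_eq_foldl).symm

-- the loop invariant: what diffProLoop computes, expressed through B's digits and strides
theorem diffProLoop_eq (k : Nat) : ∀ (n : Int), n.toNat ≤ k → ∀ (p o e : Int),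
    diffProLoop p o e n =
      if PySem.Int.mod p 2 = 0 then
        (o * (stride2 ((altDigits n).drop 1)).prod, e * (stride2 (altDigits n)).prod)
      else
        (o * (stride2 (altDigits n)).prod, e * (stride2 ((altDigits n).drop 1)).prod) := by
  induction k with
  | zero =>
    intro n hn p o e
    have hn0 : ¬ 0 < n := by omega
    rw [diffProLoop, altDigits]
    simp [hn0]
  | succ k ih =>
    intro n hn p o e
    by_cases h : 0 < n
    · have hlt := pvFloordivTenLt n h
      have hle : (PySem.Int.floordiv n 10).toNat ≤ k := by omega
      rw [diffProLoop, altDigits]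
      simp only [h, dif_pos]
      have hmod : PySem.Int.mod (p + 1) 2 = if PySem.Int.mod p 2 = 0 then 1 else 0 := by
        simp only [PySem.Int.mod, Int.fmod_eq_emod]
        omega
      by_cases hp : PySem.Int.mod p 2 = 0
      · rw [if_pos hp, ih _ hle]
        have : ¬ PySem.Int.mod (p + 1) 2 = 0 := by rw [hmod, if_pos hp]; omega
        rw [if_neg this, if_pos hp]
        simp only [List.drop_succ_cons, List.drop_zero, stride2_cons, List.prod_cons,
          Prod.mk.injEq]
        refine ⟨?_, ?_⟩ <;> first | trivial | ring
      · rw [if_neg hp, ih _ hle]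
        have : PySem.Int.mod (p + 1) 2 = 0 := by rw [hmod, if_neg hp]
        rw [if_pos this, if_neg hp]
        simp only [List.drop_succ_cons, List.drop_zero, stride2_cons, List.prod_cons,
          Prod.mk.injEq]
        refine ⟨?_, ?_⟩ <;> first | trivial | ring
    · rw [diffProLoop, altDigits]
      simp [h]

-- ===== VERDICT (by name: the statement is the Claim_ definition above) =====
theorem diff_pro_spec : Claim_equal_diff_pro := by
  intro n _
  unfold Spec_diff_pro diff_pro diff_pro_alt
  rw [diffProLoop_eq n.toNat n le_rfl 1 1 1]
  have h1 : ¬ PySem.Int.mod 1 2 = 0 := by decide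
  rw [if_neg h1]
  simp only [foldl_mul_eq_prod, one_mul]
  ring
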